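-- pv_equiv track=rewrite | github.com/kimhyeongjun95/problem_solution | offline/자가진단.py | solution
-- ===== SOURCE A (Python) =====
-- def solution(arr):
--     arr.sort()
--     answer = []
--     stack = []
--     last = 0
--     count = 1
--     for i in arr:
--         if not stack:
--             stack.append(i)
--             continue
--
--         if stack and stack[-1] == i:
--             count += 1
--         if stack and stack[-1] != i:
--             stack.pop()
--             stack.append(i)
--             if count >= 2:
--                 answer.append(count)
--             count = 1
--     if count >= 2:
--         answer.append(count)
--
--     if answer:
--         return answer
--     return [-1]
-- ===== SOURCE B (Python) =====
-- def solution(arr):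
--     arr.sort()  # kept: A sorts arr in place and the caller can observe that
--     counts = {}
--     for v in arr:
--         counts[v] = counts.get(v, 0) + 1
--     answer = [counts[v] for v in sorted(counts) if counts[v] >= 2]
--     return answer if answer else [-1]
-- ===== Notes on version B (the rewrite author's own statement) =====
-- stated objective: simpler
-- what changed: Replaces A's sequential stack/flush run-length scan (mutable stack, count and deferred flush at each value change and at loop end) by a frequency table built in one dict pass and read out over the sorted distinct keys.
import Mathlib
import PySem

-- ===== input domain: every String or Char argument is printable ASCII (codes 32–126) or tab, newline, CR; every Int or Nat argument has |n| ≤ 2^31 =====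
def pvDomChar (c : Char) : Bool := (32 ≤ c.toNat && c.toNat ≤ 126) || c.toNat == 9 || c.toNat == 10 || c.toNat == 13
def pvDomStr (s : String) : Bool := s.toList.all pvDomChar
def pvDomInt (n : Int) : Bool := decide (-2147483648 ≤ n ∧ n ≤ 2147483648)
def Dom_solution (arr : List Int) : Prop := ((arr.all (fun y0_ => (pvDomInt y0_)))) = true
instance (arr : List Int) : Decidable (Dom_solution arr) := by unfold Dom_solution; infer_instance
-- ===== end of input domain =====

-- B replaces A's stack/flush run-length scan by a frequency table read out over the sorted distinct keys (simpler);
-- like A, B sorts its argument in place — the equivalence proved here is about the return value.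


-- ===== PORT A =====
-- loop body of A's for-loop; state = (answer, stack, count)  ('last = 0' is unused in A and dropped)
def stepA (st : List Int × List Int × Int) (i : Int) : List Int × List Int × Int :=
  match st with
  | (answer, stack, count) =>
    if stack = [] then (answer, stack ++ [i], count)        -- if not stack: stack.append(i); continue
    else
      -- if stack and stack[-1] == i: count += 1
      let count1 := if stack ≠ [] ∧ PySem.List.pyGetD stack (-1) 0 = i then count + 1 else count
      -- if stack and stack[-1] != i: stack.pop(); stack.append(i); (flush); count = 1
      if stack ≠ [] ∧ PySem.List.pyGetD stack (-1) 0 ≠ i then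
        (if count1 ≥ 2 then answer ++ [count1] else answer, stack.dropLast ++ [i], 1)
      else (answer, stack, count1)

def solution (arr : List Int) : List Int :=
  let s := PySem.List.sorted arr (fun x => x) false         -- arr.sort()
  let r := s.foldl stepA ([], [], 1)
  let answer := if r.2.2 ≥ 2 then r.1 ++ [r.2.2] else r.1   -- final 'if count >= 2'
  if answer ≠ [] then answer else [-1]

-- ===== PORT B =====
def solution_alt (arr : List Int) : List Int :=
  let s := PySem.List.sorted arr (fun x => x) false         -- arr.sort()
  -- counts[v] = counts.get(v, 0) + 1 over arr
  let c := s.foldl (fun d v => d.insert v (d.getD v 0 + 1)) (PySem.Dict.empty : PySem.Dict Int Int)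
  -- [counts[v] for v in sorted(counts) if counts[v] >= 2]
  let answer := (PySem.List.sorted c.keys (fun x => x) false).foldl
      (fun acc v => if c.getD v 0 ≥ 2 then acc ++ [c.getD v 0] else acc) []
  if answer ≠ [] then answer else [-1]

-- ===== PRECONDITION & SPEC =====
def Spec_solution (arr : List Int) (out : List Int) : Prop := out = solution_alt arr
instance (arr : List Int) (out : List Int) : Decidable (Spec_solution arr out) := by unfold Spec_solution; infer_instance

-- ===== CLAIM (what is proved, stated in full; the proofs are below) =====
def Claim_equal_solution : Prop := ∀ (arr : List Int), Dom_solution arr → Spec_solution arr (solution arr)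

-- ===== LEMMAS AND PROOFS =====

-- A's loop state after the whole fold, and its final answer
def Acore (s : List Int) : List Int :=
  let r := s.foldl stepA ([], [], 1)
  if r.2.2 ≥ 2 then r.1 ++ [r.2.2] else r.1

-- B's answer list, with the counter already rewritten to List.count
def Bcore (s : List Int) : List Int :=
  ((PySem.List.sorted (PySem.Set.ofList s) (fun v => v) false).filter
      (fun v => decide ((List.count v s : Int) ≥ 2))).map (fun v => (List.count v s : Int))

lemma stepA_shift (a st : List Int) (c i : Int) :
    stepA (a, st, c) i = (a ++ (stepA ([], st, c) i).1, (stepA ([], st, c) i).2) := by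
  simp only [stepA]
  by_cases h1 : st = []
  · simp [h1]
  · by_cases h2 : PySem.List.pyGetD st (-1) 0 = i
    · simp [h1, h2]
    · simp only [h1, h2, ne_eq, not_false_iff, and_self, if_pos, and_false, if_neg]
      split_ifs <;> simp

lemma foldl_stepA_shift (l : List Int) : ∀ (a st : List Int) (c : Int),
    l.foldl stepA (a, st, c) = (a ++ (l.foldl stepA ([], st, c)).1, (l.foldl stepA ([], st, c)).2) := by
  induction l with
  | nil => intro a st c; simp
  | cons i l ih =>
    intro a st c
    simp only [List.foldl_cons]
    rw [stepA_shift a st c i]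
    rcases hp : stepA ([], st, c) i with ⟨p1, p2, p3⟩
    rw [ih (a ++ p1) p2 p3, ih p1 p2 p3]
    simp

lemma foldl_stepA_run (run : List Int) (x : Int) : ∀ (a : List Int) (c : Int),
    (∀ y ∈ run, y = x) →
    run.foldl stepA (a, [x], c) = (a, [x], c + run.length) := by
  induction run with
  | nil => intro a c _; simp
  | cons y l ih =>
    intro a c h
    have hy : y = x := h y (by simp)
    subst hy
    have hg : PySem.List.pyGetD [y] (-1) 0 = y := rfl
    have hstep : stepA (a, [y], c) y = (a, [y], c + 1) := by
      simp [stepA, hg]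
    rw [List.foldl_cons, hstep, ih a (c + 1) (fun z hz => h z (by simp [hz]))]
    simp only [List.length_cons, Prod.mk.injEq, true_and]
    push_cast
    ring

lemma foldl_if_ge2 (cnt : Int → Int) (l acc : List Int) :
    l.foldl (fun acc v => if cnt v ≥ 2 then acc ++ [cnt v] else acc) acc
      = acc ++ (l.filter (fun v => decide (cnt v ≥ 2))).map cnt := by
  simpa using PySem.List.foldl_append_if (fun v => decide (cnt v ≥ 2)) cnt l acc

lemma core_eq (n : Nat) : ∀ s : List Int, s.length ≤ n → s.Pairwise (· ≤ ·) → Acore s = Bcore s := by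
  induction n with
  | zero =>
    intro s hl _
    have hs : s = [] := List.length_eq_zero_iff.mp (Nat.le_zero.mp hl)
    subst hs; decide
  | succ n ih =>
    intro s hl hp
    match s with
    | [] => decide
    | x :: t =>
      have hx_le : ∀ v ∈ t, x ≤ v := (List.pairwise_cons.mp hp).1
      have ht_pw : t.Pairwise (· ≤ ·) := (List.pairwise_cons.mp hp).2
      have hsplit : t.takeWhile (fun y => y == x) ++ t.dropWhile (fun y => y == x) = t :=
        List.takeWhile_append_dropWhile
      set run := t.takeWhile (fun y => y == x) with hrundef
      set rest := t.dropWhile (fun y => y == x) with hrestdef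
      have hrun_eq : ∀ y ∈ run, y = x := fun y hy => by
        simpa using List.mem_takeWhile_imp hy
      have hrest_pw : rest.Pairwise (· ≤ ·) := ht_pw.sublist (List.dropWhile_sublist _)
      have hrest_mem_t : ∀ v ∈ rest, v ∈ t := fun v hv => by
        rw [← hsplit]; exact List.mem_append_right _ hv
      have hx_notin : x ∉ rest := by
        intro hmem
        obtain ⟨y, r', hr⟩ := List.exists_cons_of_ne_nil (List.ne_nil_of_mem hmem)
        have hy_ne' : y ≠ x := by
          have h0 := List.head?_dropWhile_not (fun y => y == x) t
          rw [← hrestdef, hr] at h0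
          simpa using h0
        have hxy : x < y := lt_of_le_of_ne (hx_le y (hrest_mem_t y (by rw [hr]; simp)))
          (fun h => hy_ne' h.symm)
        rw [hr] at hmem
        rcases List.mem_cons.mp hmem with h | h
        · exact hy_ne' h.symm
        · have hyx : y ≤ x := (List.pairwise_cons.mp (hr ▸ hrest_pw)).1 x h
          omega
      have hrest_lt : ∀ v ∈ rest, x < v := by
        intro v hv
        exact lt_of_le_of_ne (hx_le v (hrest_mem_t v hv)) (fun h => hx_notin (h ▸ hv))
      have hcx : List.count x (x :: t) = run.length + 1 := by
        rw [List.count_cons_self, ← hsplit, List.count_append]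
        rw [List.count_eq_length.mpr (fun b hb => (hrun_eq b hb).symm),
          List.count_eq_zero.mpr hx_notin]
      have hcv : ∀ v ∈ rest, List.count v (x :: t) = List.count v rest := by
        intro v hv
        have hvne : v ≠ x := fun h => hx_notin (h ▸ hv)
        rw [List.count_cons_of_ne (Ne.symm hvne), ← hsplit, List.count_append,
          List.count_eq_zero.mpr (fun hm => hvne (hrun_eq v hm)), Nat.zero_add]
      -- A side
      have hfold1 : (x :: t).foldl stepA ([], [], 1) = rest.foldl stepA ([], [x], 1 + (run.length : Int)) := by
        have hstep0 : stepA ([], [], 1) x = ([], [x], 1) := by simp [stepA]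
        rw [List.foldl_cons, hstep0, ← hsplit, List.foldl_append,
          foldl_stepA_run run x [] 1 hrun_eq]
      have hA : Acore (x :: t) =
          (if (1 + (run.length : Int)) ≥ 2 then [1 + (run.length : Int)] else []) ++ Acore rest := by
        cases hrest : rest with
        | nil =>
          have h12 : ¬ ((1 : Int) ≥ 2) := by norm_num
          simp only [Acore, hfold1, hrest, List.foldl_nil, if_neg h12]
          split_ifs <;> simp
        | cons y r' =>
          have hxy : x ≠ y := by
            have := hrest_lt y (by rw [hrest]; simp)
            omega
          have hg : PySem.List.pyGetD [x] (-1) 0 = x := rfl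
          have hstep2 : stepA ([], [x], 1 + (run.length : Int)) y =
              ((if (1 + (run.length : Int)) ≥ 2 then [1 + (run.length : Int)] else []), [y], 1) := by
            simp [stepA, hg, hxy]
          have hstepy : stepA ([], [], 1) y = ([], [y], 1) := by simp [stepA]
          have hq := foldl_stepA_shift r'
            (if (1 + (run.length : Int)) ≥ 2 then [1 + (run.length : Int)] else []) [y] 1
          simp only [Acore, hfold1, hrest, List.foldl_cons, hstep2, hstepy]
          rw [hq]
          split_ifs <;> simp
      -- B side
      have hkeys : PySem.List.sorted (PySem.Set.ofList (x :: t)) (fun v => v) false =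
          x :: PySem.List.sorted (PySem.Set.ofList rest) (fun v => v) false := by
        have hplt : List.Pairwise (fun a b => a < b)
            (x :: PySem.List.sorted (PySem.Set.ofList rest) (fun v => v) false) := by
          rw [List.pairwise_cons]
          refine ⟨fun v hv => hrest_lt v ?_, PySem.List.sorted_ofList_pairwise_lt rest⟩
          rw [PySem.List.mem_sorted, PySem.Set.mem_ofList] at hv
          exact hv
        refine PySem.List.sorted_eq_of_perm_of_pairwise_lt _ _ _ ?_ hplt
        rw [List.perm_ext_iff_of_nodup (hplt.imp (fun h => ne_of_lt h)) (PySem.Set.nodup_ofList _)]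
        intro a
        simp only [List.mem_cons, PySem.List.mem_sorted, PySem.Set.mem_ofList]
        rw [← hsplit]
        simp only [List.mem_append]
        constructor
        · rintro (h | h)
          · exact Or.inl h
          · exact Or.inr (Or.inr h)
        · rintro (h | h | h)
          · exact Or.inl h
          · exact Or.inl (hrun_eq a h)
          · exact Or.inr h
      have hB : Bcore (x :: t) =
          (if ((List.count x (x :: t) : Int)) ≥ 2 then [(List.count x (x :: t) : Int)] else [])
            ++ Bcore rest := by
        have hcong : (PySem.List.sorted (PySem.Set.ofList rest) (fun v => v) false).filter
              (fun v => decide ((List.count v (x :: t) : Int) ≥ 2))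
            = (PySem.List.sorted (PySem.Set.ofList rest) (fun v => v) false).filter
              (fun v => decide ((List.count v rest : Int) ≥ 2)) := by
          refine List.filter_congr (fun v hv => ?_)
          rw [hcv v (by rwa [PySem.List.mem_sorted, PySem.Set.mem_ofList] at hv)]
        have hmapsub : ((PySem.List.sorted (PySem.Set.ofList rest) (fun v => v) false).filter
              (fun v => decide ((List.count v rest : Int) ≥ 2))).map
                (fun v => (List.count v (x :: t) : Int))
            = ((PySem.List.sorted (PySem.Set.ofList rest) (fun v => v) false).filter
              (fun v => decide ((List.count v rest : Int) ≥ 2))).map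
                (fun v => (List.count v rest : Int)) := by
          refine List.map_congr_left (fun v hv => ?_)
          have hm := (List.mem_filter.mp hv).1
          rw [PySem.List.mem_sorted, PySem.Set.mem_ofList] at hm
          rw [hcv v hm]
        simp only [Bcore, hkeys, List.filter_cons, hcong, decide_eq_true_eq]
        by_cases hge : ((List.count x (x :: t) : Int)) ≥ 2
        · rw [if_pos hge, if_pos hge, List.map_cons, hmapsub]; rfl
        · rw [if_neg hge, if_neg hge, hmapsub]; rfl
      -- combine
      have hlen : rest.length ≤ n := by
        have h1 : rest.length ≤ t.length := List.length_dropWhile_le _ t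
        simp only [List.length_cons] at hl
        omega
      have hcast : ((run.length + 1 : Nat) : Int) = 1 + (run.length : Int) := by push_cast; ring
      rw [hA, hB, hcx, hcast, ih rest hlen hrest_pw]

-- ===== VERDICT (by name: the statement is the Claim_ definition above) =====
theorem solution_spec : Claim_equal_solution := by
  intro arr _
  show solution arr = solution_alt arr
  have hp : (PySem.List.sorted arr (fun x => x) false).Pairwise (· ≤ ·) :=
    PySem.List.sorted_pairwise arr (fun x => x)
  have hA : solution arr =
      if Acore (PySem.List.sorted arr (fun x => x) false) ≠ [] then
        Acore (PySem.List.sorted arr (fun x => x) false) else [-1] := rfl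
  have hB : solution_alt arr =
      if Bcore (PySem.List.sorted arr (fun x => x) false) ≠ [] then
        Bcore (PySem.List.sorted arr (fun x => x) false) else [-1] := by
    simp only [solution_alt, PySem.Dict.foldl_insert_getD_add_one_eq_counter,
      PySem.Dict.keys_counter, PySem.Dict.getD_counter, foldl_if_ge2, List.nil_append, Bcore]
  rw [hA, hB, core_eq _ _ le_rfl hp]
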